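-- pv_equiv track=rewrite | github.com/ONKARG1311/Python-LeetCode-Programs | NB020_Length_of_Optimal_Compression_3.py | getLengthOfOptimalCompression
-- ===== SOURCE A (Python) =====
-- def getLengthOfOptimalCompression(s: str, k: int) -> int:
--
--     if s.strip() == str():
--         return 0
--
--     temp = list()
--     for i in range(len(s)):
--         if temp == list():
--             temp.append(1)
--         elif s[i] == s[i-1]:
--             temp.append(temp.pop()+1)
--         else:
--             temp.append(1)
--     temp.sort()
--
--     sum = k
--     for i in range(len(temp)):
--         if sum >= temp[i]:
--             sum -= temp[i]
--             temp[i] = 0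
--         else:
--             temp[i] -= sum
--             break
--
--     sum = 0
--     for i in temp:
--         if i == 1:
--             sum += 1
--         elif i > 1:
--             sum += len(str(i))+1
--
--     return sum
-- ===== SOURCE B (Python) =====
-- def _cost(x):
--     return 1 if x == 1 else len(str(x)) + 1
--
--
-- def getLengthOfOptimalCompression(s: str, k: int) -> int:
--     if s.strip() == str():
--         return 0
--     # run lengths by a two-pointer scan: j runs ahead over each block
--     runs = []
--     i = 0
--     n = len(s)
--     while i < n:
--         j = i
--         while j < n and s[j] == s[i]:
--             j += 1
--         runs.append(j - i)
--         i = j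
--     runs.sort()
--     # prefix sums of the sorted run lengths
--     pref = []
--     t = 0
--     for r in runs:
--         t += r
--         pref.append(t)
--     # binary search: number of runs the budget deletes entirely
--     lo, hi = 0, len(runs)
--     while lo < hi:
--         mid = (lo + hi) // 2
--         if pref[mid] <= k:
--             lo = mid + 1
--         else:
--             hi = mid
--     if lo == len(runs):
--         return 0
--     rem = k - (pref[lo - 1] if lo > 0 else 0)
--     ans = _cost(runs[lo] - rem)
--     for r in runs[lo + 1:]:
--         ans += _cost(r)
--     return ans
-- ===== Notes on version B (the rewrite author's own statement) =====
-- stated objective: alternative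
-- what changed: Replaces A's per-run greedy deletion loop and separate costing pass with a two-pointer block scan for run lengths, prefix sums of the sorted runs, a hand-written binary search for the number of fully deleted runs, and a closed-form cost of the partially reduced run plus the untouched suffix.
import Mathlib
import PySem

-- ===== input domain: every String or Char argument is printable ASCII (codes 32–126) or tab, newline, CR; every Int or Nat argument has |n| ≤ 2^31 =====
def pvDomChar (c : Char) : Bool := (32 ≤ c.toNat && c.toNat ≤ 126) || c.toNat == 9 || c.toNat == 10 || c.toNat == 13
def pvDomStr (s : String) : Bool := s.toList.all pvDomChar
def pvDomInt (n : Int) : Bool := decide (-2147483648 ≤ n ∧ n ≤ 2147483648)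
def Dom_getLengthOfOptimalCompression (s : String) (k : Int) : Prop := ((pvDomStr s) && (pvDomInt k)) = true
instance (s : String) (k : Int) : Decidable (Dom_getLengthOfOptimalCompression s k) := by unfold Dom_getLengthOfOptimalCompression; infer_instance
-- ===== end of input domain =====

-- B replaces A's per-run greedy deletion loop by arithmetic: two-pointer run building,
-- prefix sums of the sorted runs, a hand-written binary search for the number of fully
-- deleted runs, and a closed-form cost of the remainder (objective: alternative).

-- ===== PORT A =====
-- first loop of A: builds the run-length list temp (temp.append / temp.pop become list snoc / dropLast+getLast)
def stepA (s : String) (temp : List Int) (i : Int) : List Int :=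
  if temp = [] then temp ++ [1]
  else if PySem.Str.pyGet? s i == PySem.Str.pyGet? s (i - 1) then
    temp.dropLast ++ [temp.getLast?.getD 0 + 1]   -- temp.append(temp.pop()+1); temp is nonempty in this branch
  else temp ++ [1]

-- second loop of A (greedy deletion with break), as structural recursion over the list
def consumeA : List Int → Int → List Int
  | [], _ => []
  | t :: ts, sum => if sum ≥ t then 0 :: consumeA ts (sum - t) else (t - sum) :: ts

-- third loop of A: accumulate the compressed length
def costA (acc i : Int) : Int :=
  if i = 1 then acc + 1 else if 1 < i then acc + PySem.Str.len (PySem.Int.toStr i) + 1 else acc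

def getLengthOfOptimalCompression (s : String) (k : Int) : Int :=
  if PySem.Str.strip s = "" then 0
  else
    let temp := (PySem.List.pyRange 0 (PySem.Str.len s)).foldl (stepA s) []
    let temp2 := PySem.List.sorted temp (fun x => x)
    let temp3 := consumeA temp2 k
    temp3.foldl costA 0

-- ===== PORT B =====
def costB (x : Int) : Int :=
  if x = 1 then 1 else PySem.Str.len (PySem.Int.toStr x) + 1

-- B's outer while loop over i: each step scans one whole block of equal characters
-- (the inner `while j < n and s[j] == s[i]` is the takeWhile count) and jumps i past it.
def runsB : List Char → List Int
  | [] => []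
  | c :: rest =>
    let j := 1 + (rest.takeWhile (fun x => x == c)).length
    ((j : Int)) :: runsB ((c :: rest).drop j)
termination_by cs => cs.length
decreasing_by
  simp only [List.length_drop, List.length_cons]
  have := (List.takeWhile_sublist (l := rest) (fun x => x == c)).length_le
  omega

-- B's binary-search while loop; pref[mid] is always in range, getD transliterates the index
def bsearchB (pref : List Int) (k : Int) (lo hi : Nat) : Nat :=
  if lo < hi then
    let mid := (lo + hi) / 2
    if pref.getD mid 0 ≤ k then bsearchB pref k (mid + 1) hi else bsearchB pref k lo mid
  else lo
termination_by hi - lo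
decreasing_by all_goals omega

def getLengthOfOptimalCompression_alt (s : String) (k : Int) : Int :=
  if PySem.Str.strip s = "" then 0
  else
    let runs := PySem.List.sorted (runsB s.toList) (fun x => x)
    -- prefix-sum loop: pref = []; t = 0; for r in runs: t += r; pref.append(t)
    let pref := (runs.foldl (fun (a : List Int × Int) r => (a.1 ++ [a.2 + r], a.2 + r)) ([], 0)).1
    let lo := bsearchB pref k 0 runs.length
    if lo = runs.length then 0
    else
      let rem := k - (if 0 < lo then pref.getD (lo - 1) 0 else 0)
      (runs.drop (lo + 1)).foldl (fun a r => a + costB r) (costB (runs.getD lo 0 - rem))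

-- ===== PRECONDITION & SPEC =====
def Spec_getLengthOfOptimalCompression (s : String) (k : Int) (out : Int) : Prop := out = getLengthOfOptimalCompression_alt s k
instance (s : String) (k : Int) (out : Int) : Decidable (Spec_getLengthOfOptimalCompression s k out) := by unfold Spec_getLengthOfOptimalCompression; infer_instance

-- ===== CLAIM (what is proved, stated in full; the proofs are below) =====
def Claim_equal_getLengthOfOptimalCompression : Prop := ∀ (s : String) (k : Int), Dom_getLengthOfOptimalCompression s k → Spec_getLengthOfOptimalCompression s k (getLengthOfOptimalCompression s k)

-- ===== LEMMAS AND PROOFS =====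

-- A's run list after the first m characters
def tempA (s : String) (m : Nat) : List Int :=
  (PySem.List.pyRange 0 (m : Int)).foldl (stepA s) []

-- proof-side char-by-char run builder bridging A's position fold and B's block scan
def stepB (st : List Int × Int × Option Char) (ch : Char) : List Int × Int × Option Char :=
  match st with
  | (rs, run, prev) =>
    if (match prev with | some p => ch == p | none => false) then (rs, run + 1, prev)
    else ((if 0 < run then rs ++ [run] else rs), 1, some ch)

def stB (cs : List Char) (m : Nat) : List Int × Int × Option Char :=
  (cs.take m).foldl stepB ([], 0, none)

-- joint invariant of A's first loop and the char-by-char run builder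
lemma runs_inv (s : String) (m : Nat) (hm : m ≤ s.toList.length) (hm0 : m ≠ 0) :
    tempA s m = (stB s.toList m).1 ++ [(stB s.toList m).2.1]
    ∧ (stB s.toList m).2.2 = s.toList[m-1]?
    ∧ 1 ≤ (stB s.toList m).2.1 ∧ (∀ x ∈ (stB s.toList m).1, 1 ≤ x) := by
  induction m with
  | zero => exact absurd rfl hm0
  | succ m ih =>
    have hmlt : m < s.toList.length := by omega
    have hstep : stB s.toList (m+1) = stepB (stB s.toList m) (s.toList[m]) := by
      have h : List.take (m+1) s.toList = List.take m s.toList ++ [s.toList[m]] := by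
        rw [List.take_add_one, List.getElem?_eq_getElem hmlt]; rfl
      unfold stB
      rw [h, List.foldl_append]
      rfl
    have htA : tempA s (m+1) = stepA s (tempA s m) (m : Int) := by
      unfold tempA
      rw [show (((m+1 : Nat)) : Int) = (m : Int) + 1 by push_cast; ring,
        PySem.List.pyRange_one_succ_right (by positivity), List.foldl_append]
      rfl
    have hg1 : PySem.Str.pyGet? s (m : Int) = some (s.toList[m]) := by
      rw [PySem.Str.pyGet?_natCast, List.getElem?_eq_getElem hmlt]
    by_cases hm' : m = 0
    · subst hm'
      rw [hstep, htA]
      have h0 : stB s.toList 0 = ([], 0, none) := rfl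
      have h1 : tempA s 0 = [] := rfl
      rw [h0, h1]
      simp [stepA, stepB, List.getElem?_eq_getElem hmlt]
    · have hm1 : m - 1 < s.toList.length := by omega
      obtain ⟨ih1, ih2, ih3, ih4⟩ := ih (by omega) hm'
      have hg2 : PySem.Str.pyGet? s ((m : Int) - 1) = some (s.toList[m-1]) := by
        have : ((m : Int) - 1) = ((m - 1 : Nat) : Int) := by omega
        rw [this, PySem.Str.pyGet?_natCast, List.getElem?_eq_getElem hm1]
      rcases hst : stB s.toList m with ⟨rs, run, prev⟩
      rw [hst] at ih1 ih2 ih3 ih4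
      simp only at ih1 ih2 ih3 ih4
      have hprev : prev = some (s.toList[m-1]) := by
        rw [ih2, List.getElem?_eq_getElem hm1]
      rw [hstep, htA, ih1, hst]
      have hne : rs ++ [run] ≠ [] := by simp
      simp only [stepB, hprev, stepA, if_neg hne, hg1, hg2]
      by_cases hc : s.toList[m] = s.toList[m-1]
      · simp only [hc, beq_self_eq_true, if_true]
        rw [List.dropLast_concat, List.getLast?_concat]
        refine ⟨by simp, ?_, by omega, ih4⟩
        rw [Nat.add_sub_cancel, List.getElem?_eq_getElem hmlt, hc]
      · have hbf : (some (s.toList[m]) == some (s.toList[m-1])) = false := by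
          simp [hc]
        simp only [hbf, Bool.false_eq_true, if_false,
          if_pos (show (0:Int) < run by omega)]
        rw [ite_cond_eq_false _ _ (by simp [hc])]
        refine ⟨by simp, ?_, by simp, ?_⟩
        · rw [Nat.add_sub_cancel, List.getElem?_eq_getElem hmlt]
        · intro x hx
          rcases List.mem_append.mp hx with h | h
          · exact ih4 x h
          · simp at h; omega

lemma dropWhile_eq_drop (p : Char → Bool) (l : List Char) :
    l.dropWhile p = l.drop (l.takeWhile p).length := by
  induction l with
  | nil => rfl
  | cons a l ih =>
    by_cases hp : p a
    · simp [hp, ih]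
    · simp [hp]

lemma runsB_cons (c : Char) (cs : List Char) :
    runsB (c :: cs) = ((((1 + (cs.takeWhile (fun x => x == c)).length : Nat)) : Int))
      :: runsB (cs.dropWhile (fun x => x == c)) := by
  rw [runsB]
  congr 1
  rw [Nat.add_comm, List.drop_succ_cons, ← dropWhile_eq_drop]

-- the char-by-char builder, started inside a run, produces that run then runsB of the rest
lemma stepB_run (cs : List Char) : ∀ (rs : List Int) (run : Int) (p : Char), 1 ≤ run →
    (cs.foldl stepB (rs, run, some p)).1 ++ [(cs.foldl stepB (rs, run, some p)).2.1]
      = rs ++ (run + ((cs.takeWhile (fun x => x == p)).length : Int))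
          :: runsB (cs.dropWhile (fun x => x == p)) := by
  induction cs with
  | nil => intro rs run p _; simp [runsB]
  | cons c cs ih =>
    intro rs run p hrun
    by_cases hc : c = p
    · have hstep : stepB (rs, run, some p) c = (rs, run + 1, some p) := by
        simp [stepB, hc]
      rw [List.foldl_cons, hstep, ih rs (run + 1) p (by omega)]
      simp only [List.takeWhile_cons, List.dropWhile_cons, hc, beq_self_eq_true, if_true,
        List.length_cons]
      congr 2
      push_cast
      ring
    · have hstep : stepB (rs, run, some p) c = (rs ++ [run], 1, some c) := by
        simp [stepB, hc, show (0:Int) < run by omega]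
      rw [List.foldl_cons, hstep, ih (rs ++ [run]) 1 c (by omega)]
      have hcf : (c == p) = false := by simp [hc]
      simp only [List.takeWhile_cons, List.dropWhile_cons, hcf, Bool.false_eq_true, if_false,
        runsB_cons, List.length_nil, Nat.cast_zero, add_zero,
        List.append_assoc, List.singleton_append]
      push_cast
      ring_nf

-- B's block-scan run list equals A's run list, and all runs are ≥ 1
lemma runs_eq (s : String) (h : s.toList ≠ []) :
    runsB s.toList = tempA s s.toList.length
    ∧ (∀ x ∈ tempA s s.toList.length, 1 ≤ x) := by
  have hn : s.toList.length ≠ 0 := by simpa [List.length_eq_zero_iff] using h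
  obtain ⟨h1, h2, h3, h4⟩ := runs_inv s s.toList.length (le_refl _) hn
  have ht : stB s.toList s.toList.length = s.toList.foldl stepB ([], 0, none) := by
    unfold stB; rw [List.take_length]
  rw [ht] at h1 h3 h4
  obtain ⟨c, cs, hcs⟩ : ∃ c cs, s.toList = c :: cs := by
    cases hcs : s.toList with
    | nil => exact absurd hcs h
    | cons c cs => exact ⟨c, cs, rfl⟩
  have hfold : s.toList.foldl stepB ([], 0, none) = cs.foldl stepB ([], 1, some c) := by
    rw [hcs]; rfl
  have hB : runsB s.toList = [] ++ ((1 : Int) + ((cs.takeWhile (fun x => x == c)).length : Int))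
      :: runsB (cs.dropWhile (fun x => x == c)) := by
    rw [hcs, runsB_cons]
    push_cast
    rw [List.nil_append]
  have := stepB_run cs [] 1 c (by omega)
  rw [← hfold] at this
  refine ⟨?_, ?_⟩
  · rw [hB, ← this, ← h1]
  · intro x hx
    rw [h1] at hx
    rcases List.mem_append.mp hx with hx | hx
    · exact h4 x hx
    · simp at hx; omega

-- pointwise cost of a single run value in A's third loop
def gCost (i : Int) : Int :=
  if i = 1 then 1 else if 1 < i then PySem.Str.len (PySem.Int.toStr i) + 1 else 0

def costSum (l : List Int) : Int := l.foldl costA 0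

lemma costA_eq_add (a i : Int) : costA a i = a + gCost i := by
  unfold costA gCost; split_ifs <;> ring

lemma foldl_costA (l : List Int) (a : Int) : l.foldl costA a = a + (l.map gCost).sum := by
  simp only [show costA = fun a x => a + gCost x from funext fun a => funext fun x => costA_eq_add a x]
  exact PySem.List.foldl_add l gCost a

lemma costSum_cons (x : Int) (l : List Int) : costSum (x :: l) = gCost x + costSum l := by
  simp [costSum, foldl_costA, costA_eq_add]

lemma gCost_eq_costB {x : Int} (hx : 1 ≤ x) : gCost x = costB x := by
  unfold gCost costB; split_ifs <;> omega

lemma map_gCost_eq (l : List Int) (h : ∀ x ∈ l, 1 ≤ x) : l.map gCost = l.map costB :=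
  List.map_congr_left fun x hx => gCost_eq_costB (h x hx)

-- A's greedy pass followed by costing, as a single structural recursion
def G : List Int → Int → Int
  | [], _ => 0
  | r :: rest, k => if r ≤ k then G rest (k - r) else costB (r - k) + (rest.map costB).sum

lemma consumeA_cost (R : List Int) : ∀ (k : Int), (∀ x ∈ R, 1 ≤ x) →
    costSum (consumeA R k) = G R k := by
  induction R with
  | nil => intro k _; rfl
  | cons r rest ih =>
    intro k hpos
    have hr1 : 1 ≤ r := hpos r (by simp)
    have hrest : ∀ x ∈ rest, 1 ≤ x := fun x hx => hpos x (by simp [hx])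
    simp only [consumeA, G, ge_iff_le]
    by_cases hr : r ≤ k
    · simp only [hr, if_true]
      rw [costSum_cons, ih (k - r) hrest]
      have : gCost 0 = 0 := by decide
      rw [this]; ring
    · simp only [hr, if_false]
      rw [costSum_cons, gCost_eq_costB (by omega)]
      rw [show costSum rest = 0 + (rest.map gCost).sum from foldl_costA rest 0,
        map_gCost_eq rest hrest]
      ring

-- prefix sums starting from t
def psum : Int → List Int → List Int
  | _, [] => []
  | t, r :: rs => (t + r) :: psum (t + r) rs

lemma length_psum (rs : List Int) : ∀ t, (psum t rs).length = rs.length := by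
  induction rs with
  | nil => intro t; rfl
  | cons r rs ih => intro t; simp [psum, ih]

lemma psum_shift (rs : List Int) : ∀ (a b : Int), psum (a + b) rs = (psum b rs).map (fun x => a + x) := by
  induction rs with
  | nil => intro a b; rfl
  | cons r rs ih =>
    intro a b
    simp only [psum, List.map_cons, List.cons.injEq]
    constructor
    · ring
    · rw [show a + b + r = a + (b + r) by ring, ih]

lemma mem_psum_le (rs : List Int) (h : ∀ x ∈ rs, 0 ≤ x) : ∀ t, ∀ y ∈ psum t rs, t ≤ y := by
  induction rs with
  | nil => intro t y hy; simp [psum] at hy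
  | cons r rs ih =>
    intro t y hy
    have hr : 0 ≤ r := h r (by simp)
    rcases List.mem_cons.mp hy with hy | hy
    · omega
    · have := ih (fun x hx => h x (by simp [hx])) (t + r) y hy
      omega

lemma psum_pairwise (rs : List Int) (h : ∀ x ∈ rs, 0 ≤ x) :
    ∀ t, (psum t rs).Pairwise (· ≤ ·) := by
  induction rs with
  | nil => intro t; simp [psum]
  | cons r rs ih =>
    intro t
    have hrs : ∀ x ∈ rs, 0 ≤ x := fun x hx => h x (by simp [hx])
    refine List.pairwise_cons.mpr ⟨?_, ih hrs (t + r)⟩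
    intro y hy
    exact mem_psum_le rs hrs (t + r) y hy

-- B's prefix-sum loop builds psum
lemma foldl_pref (rs : List Int) : ∀ (acc : List Int) (t : Int),
    (rs.foldl (fun (a : List Int × Int) r => (a.1 ++ [a.2 + r], a.2 + r)) (acc, t)).1
      = acc ++ psum t rs := by
  induction rs with
  | nil => intro acc t; simp [psum]
  | cons r rs ih =>
    intro acc t
    simp only [List.foldl_cons, psum]
    rw [ih (acc ++ [t + r]) (t + r)]
    simp

-- the number of prefix-sum entries ≤ k (index of the first run not fully deleted)
def cLe (k : Int) : List Int → Nat
  | [] => 0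
  | p :: ps => if p ≤ k then cLe k ps + 1 else 0

lemma cLe_le_length (k : Int) (ps : List Int) : cLe k ps ≤ ps.length := by
  induction ps with
  | nil => simp [cLe]
  | cons p ps ih => simp only [cLe, List.length_cons]; split_ifs <;> omega

lemma cLe_map_add (k r : Int) (ps : List Int) :
    cLe k (ps.map (fun x => r + x)) = cLe (k - r) ps := by
  induction ps with
  | nil => rfl
  | cons p ps ih =>
    simp only [List.map_cons, cLe, ih]
    congr 1
    simp only [eq_iff_iff]
    omega

-- on a sorted prefix-sum list, entries ≤ k are exactly the first cLe entries
lemma cLe_iff (k : Int) (ps : List Int) (hmono : ps.Pairwise (· ≤ ·)) :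
    ∀ i (h : i < ps.length), (ps[i] ≤ k ↔ i < cLe k ps) := by
  induction ps with
  | nil => intro i h; simp at h
  | cons p ps ih =>
    intro i h
    rcases List.pairwise_cons.mp hmono with ⟨hp, htail⟩
    cases i with
    | zero =>
      simp only [List.getElem_cons_zero, cLe]
      split_ifs with h1 <;> simp [h1]
    | succ i =>
      have hi : i < ps.length := by simpa using h
      simp only [List.getElem_cons_succ, cLe]
      split_ifs with h1
      · rw [ih htail i hi]
        omega
      · constructor
        · intro hle
          exact absurd (le_trans (hp _ (List.getElem_mem hi)) hle) h1
        · omega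

-- correctness of the hand-written binary search
lemma bsearch_eq (pref : List Int) (k : Int) (hmono : pref.Pairwise (· ≤ ·)) :
    ∀ (n lo hi : Nat), hi - lo ≤ n → lo ≤ cLe k pref → cLe k pref ≤ hi → hi ≤ pref.length →
    bsearchB pref k lo hi = cLe k pref := by
  intro n
  induction n with
  | zero =>
    intro lo hi h1 h2 h3 h4
    rw [bsearchB, if_neg (by omega)]
    omega
  | succ n ih =>
    intro lo hi h1 h2 h3 h4
    by_cases hlt : lo < hi
    · rw [bsearchB, if_pos hlt]
      have hmid1 : lo ≤ (lo + hi) / 2 := by omega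
      have hmid2 : (lo + hi) / 2 < hi := by omega
      have hmlen : (lo + hi) / 2 < pref.length := by omega
      show (if pref.getD ((lo + hi) / 2) 0 ≤ k then bsearchB pref k ((lo + hi) / 2 + 1) hi
        else bsearchB pref k lo ((lo + hi) / 2)) = cLe k pref
      rw [List.getD_eq_getElem pref 0 hmlen]
      by_cases hle : pref[(lo + hi) / 2] ≤ k
      · have : (lo + hi) / 2 < cLe k pref := (cLe_iff k pref hmono _ hmlen).mp hle
        rw [if_pos hle]
        exact ih _ hi (by omega) (by omega) h3 h4
      · have : ¬ ((lo + hi) / 2 < cLe k pref) :=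
          fun hc => hle ((cLe_iff k pref hmono _ hmlen).mpr hc)
        rw [if_neg hle]
        exact ih lo _ (by omega) h2 (by omega) (by omega)
    · rw [bsearchB, if_neg hlt]
      omega

lemma getD_map_add (r : Int) (l : List Int) (i : Nat) (h : i < l.length) :
    (l.map (fun x => r + x)).getD i 0 = r + l.getD i 0 := by
  rw [List.getD_eq_getElem _ 0 (by simpa using h), List.getD_eq_getElem _ 0 h, List.getElem_map]

-- closed form of B's tail: the branch after the binary search
def closedForm (R : List Int) (k : Int) : Int :=
  if cLe k (psum 0 R) = R.length then 0
  else costB (R.getD (cLe k (psum 0 R)) 0 - (k - (if 0 < cLe k (psum 0 R)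
         then (psum 0 R).getD (cLe k (psum 0 R) - 1) 0 else 0)))
       + ((R.drop (cLe k (psum 0 R) + 1)).map costB).sum

lemma psum_zero_cons (r : Int) (rest : List Int) :
    psum 0 (r :: rest) = r :: (psum 0 rest).map (fun x => r + x) := by
  simp only [psum, zero_add]
  rw [show r = r + 0 by ring, psum_shift]
  ring_nf

-- G equals the closed form computed from prefix sums
lemma G_eq_closed (R : List Int) : ∀ (k : Int), (∀ x ∈ R, 1 ≤ x) → G R k = closedForm R k := by
  induction R with
  | nil => intro k _; rfl
  | cons r rest ih =>
    intro k hpos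
    have hr1 : 1 ≤ r := hpos r (by simp)
    have hrest : ∀ x ∈ rest, 1 ≤ x := fun x hx => hpos x (by simp [hx])
    have hcons : cLe k (psum 0 (r :: rest))
        = if r ≤ k then cLe (k - r) (psum 0 rest) + 1 else 0 := by
      rw [psum_zero_cons, cLe, cLe_map_add]
    by_cases hr : r ≤ k
    · have hc : cLe k (psum 0 (r :: rest)) = cLe (k - r) (psum 0 rest) + 1 := by
        rw [hcons, if_pos hr]
      set c' := cLe (k - r) (psum 0 rest) with hc'
      have hG : G (r :: rest) k = G rest (k - r) := by simp [G, hr]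
      rw [hG, ih (k - r) hrest]
      unfold closedForm
      rw [hc, ← hc']
      have hlen : (psum 0 rest).length = rest.length := length_psum rest 0
      by_cases hend : c' = rest.length
      · rw [if_pos hend, if_pos (by rw [List.length_cons, hend])]
      · rw [if_neg hend]
        have hc'lt : c' < rest.length := lt_of_le_of_ne (by rw [← hlen]; exact cLe_le_length _ _) hend
        have hQ : (r :: (psum 0 rest).map (fun x => r + x)).getD c' 0
            = r + (if 0 < c' then (psum 0 rest).getD (c' - 1) 0 else 0) := by
          by_cases h0 : 0 < c'
          · rw [if_pos h0]
            have hj' : c' = (c' - 1) + 1 := by omega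
            rw [hj', List.getD_cons_succ, Nat.add_sub_cancel,
              getD_map_add r _ (c' - 1) (by rw [length_psum]; omega)]
          · rw [if_neg h0, show c' = 0 by omega, List.getD_cons_zero]
            ring
        rw [if_neg (show ¬ (c' + 1 = (r :: rest).length) from by rw [List.length_cons]; omega),
          List.getD_cons_succ, List.drop_succ_cons,
          if_pos (by omega : 0 < c' + 1), Nat.add_sub_cancel, psum_zero_cons, hQ,
          show k - (r + (if 0 < c' then (psum 0 rest).getD (c' - 1) 0 else 0))
            = k - r - (if 0 < c' then (psum 0 rest).getD (c' - 1) 0 else 0) from by ring]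
    · have hc : cLe k (psum 0 (r :: rest)) = 0 := by rw [hcons, if_neg hr]
      have hG : G (r :: rest) k = costB (r - k) + (rest.map costB).sum := by simp [G, hr]
      unfold closedForm
      rw [hc, hG, if_neg (by simp only [List.length_cons]; omega)]
      simp

-- ===== VERDICT (by name: the statement is the Claim_ definition above) =====
theorem getLengthOfOptimalCompression_spec : Claim_equal_getLengthOfOptimalCompression := by
  intro s k _
  unfold Spec_getLengthOfOptimalCompression
  unfold getLengthOfOptimalCompression getLengthOfOptimalCompression_alt
  by_cases hs : PySem.Str.strip s = ""
  · rw [if_pos hs, if_pos hs]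
  · rw [if_neg hs, if_neg hs]
    have hne : s.toList ≠ [] := by
      intro h0
      apply hs
      rw [String.toList_eq_nil_iff.mp h0]
      rfl
    obtain ⟨hrB, hpos⟩ := runs_eq s hne
    have hA : (PySem.List.pyRange 0 (PySem.Str.len s)).foldl (stepA s) []
        = tempA s s.toList.length := by
      rw [PySem.Str.len_eq]; rfl
    simp only [hA, ← hrB]
    set R := PySem.List.sorted (runsB s.toList) (fun x => x) with hR
    have hRpos : ∀ x ∈ R, 1 ≤ x := by
      intro x hx
      rw [hR, PySem.List.mem_sorted] at hx
      rw [hrB] at hx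
      exact hpos x hx
    -- A's side: greedy pass + costing = G
    rw [show (consumeA R k).foldl costA 0 = costSum (consumeA R k) from rfl,
      consumeA_cost R k hRpos]
    -- B's side: rewrite the prefix-sum loop, the binary search, and the final fold
    rw [foldl_pref R [] 0, List.nil_append]
    have hmono : (psum 0 R).Pairwise (· ≤ ·) :=
      psum_pairwise R (fun x hx => by have := hRpos x hx; omega) 0
    have hlen : (psum 0 R).length = R.length := length_psum R 0
    rw [bsearch_eq (psum 0 R) k hmono (R.length) 0 R.length (by omega)
      (by omega) (by rw [← hlen]; exact cLe_le_length _ _) (by omega)]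
    rw [G_eq_closed R k hRpos]
    unfold closedForm
    by_cases hend : cLe k (psum 0 R) = R.length
    · rw [if_pos hend, if_pos hend]
    · rw [if_neg hend, if_neg hend]
      rw [PySem.List.foldl_add]
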